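-- pv_equiv track=rewrite | github.com/msahasrabudhe/jacs_clf | src/optimise_thresholds.py | get_limits
-- ===== SOURCE A (Python) =====
-- def get_limits(vector):
--     prev = vector[0]
--     limits = []
--     start = prev
--
--     for l in vector[1:]:
--         if l - prev > 1:
--             limits.append(start)
--             limits.append(prev)
--             start = l
--
--         prev = l
--     limits.append(start)
--     limits.append(prev)
--     return limits
-- ===== SOURCE B (Python) =====
-- def get_limits(vector):
--     n = len(vector)
--     breaks = [i for i in range(1, n) if vector[i] - vector[i - 1] > 1]
--     out = []
--     start = 0
--     for b in breaks:
--         out.append(vector[start])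
--         out.append(vector[b - 1])
--         start = b
--     out.append(vector[start])
--     out.append(vector[n - 1])
--     return out
-- ===== Notes on version B (the rewrite author's own statement) =====
-- stated objective: alternative
-- what changed: A's single stateful scan (prev/start carried through one loop) is replaced by two passes: first a comprehension builds the table of break indices where consecutive elements differ by more than 1, then a separate loop over that table emits the boundary values by index.
import Mathlib
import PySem

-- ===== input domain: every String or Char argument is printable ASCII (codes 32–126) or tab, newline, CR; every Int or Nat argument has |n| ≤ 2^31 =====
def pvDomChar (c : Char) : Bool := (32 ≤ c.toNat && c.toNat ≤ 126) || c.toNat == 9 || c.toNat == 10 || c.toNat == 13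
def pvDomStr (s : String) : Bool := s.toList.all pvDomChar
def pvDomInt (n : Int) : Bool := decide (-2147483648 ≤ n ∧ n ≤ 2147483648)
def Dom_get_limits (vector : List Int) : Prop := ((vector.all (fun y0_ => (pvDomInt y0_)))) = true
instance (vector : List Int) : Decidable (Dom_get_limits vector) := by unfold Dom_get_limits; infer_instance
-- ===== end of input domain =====

-- B replaces A's single stateful scan by two passes — a table of break indices (gaps > 1), then a
-- boundary-emitting loop over that table — same return value on every non-empty vector (objective: alternative).

-- ===== PORT A =====
-- the for-loop of A: state prev / start / limits
def getLimitsLoop : List Int → Int → Int → List Int → List Int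
  | [], prev, start, limits => limits ++ [start, prev]
  | l :: rest, prev, start, limits =>
      if l - prev > 1 then getLimitsLoop rest l l (limits ++ [start, prev])
      else getLimitsLoop rest l start limits

def get_limits (vector : List Int) : List Int :=
  let prev := PySem.List.pyGetD vector 0 0      -- vector[0]; Pre_ excludes the empty list (IndexError)
  getLimitsLoop (PySem.List.slice vector (some 1) none) prev prev []

-- ===== PORT B =====
-- B's emitting loop: walks the break table keeping the current run's start index, then the trailing appends
def altLoop (vector : List Int) : List Int → Int → List Int → List Int
  | [], start, out =>
      out ++ [PySem.List.pyGetD vector start 0,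
              PySem.List.pyGetD vector ((vector.length : Int) - 1) 0]
  | b :: bs, start, out =>
      altLoop vector bs b
        (out ++ [PySem.List.pyGetD vector start 0, PySem.List.pyGetD vector (b - 1) 0])

def get_limits_alt (vector : List Int) : List Int :=
  let n : Int := vector.length
  let breaks := (PySem.List.pyRange 1 n 1).filter
    (fun i => decide (PySem.List.pyGetD vector i 0 - PySem.List.pyGetD vector (i - 1) 0 > 1))
  altLoop vector breaks 0 []

-- ===== PRECONDITION & SPEC =====
-- Pre_ excludes only the empty list, on which both Pythons raise IndexError (vector[0]).
def Pre_get_limits (vector : List Int) : Prop := vector ≠ []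
instance (vector : List Int) : Decidable (Pre_get_limits vector) := by unfold Pre_get_limits; infer_instance

def pvWitness_get_limits : List Int := [1, 2, 5, 6, 9]

def Spec_get_limits (vector : List Int) (out : List Int) : Prop := out = get_limits_alt vector
instance (vector : List Int) (out : List Int) : Decidable (Spec_get_limits vector out) := by unfold Spec_get_limits; infer_instance

-- ===== CLAIM (what is proved, stated in full; the proofs are below) =====
def Claim_equal_get_limits : Prop := ∀ (vector : List Int), Dom_get_limits vector → Pre_get_limits vector → Spec_get_limits vector (get_limits vector)

-- ===== LEMMAS AND PROOFS =====

-- the common shape: boundary values emitted after the initial run start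
def hRun : Int → List Int → List Int
  | prev, [] => [prev]
  | prev, l :: rest => if l - prev > 1 then prev :: l :: hRun l rest else hRun l rest

-- B's emitted tail as a pure function of the break table
def kRun (v : List Int) : List Int → List Int
  | [] => [PySem.List.pyGetD v ((v.length : Int) - 1) 0]
  | b :: bs => PySem.List.pyGetD v (b - 1) 0 :: PySem.List.pyGetD v b 0 :: kRun v bs

def breaksOf (v : List Int) : List Int :=
  (PySem.List.pyRange 1 (v.length : Int) 1).filter
    (fun i => decide (PySem.List.pyGetD v i 0 - PySem.List.pyGetD v (i - 1) 0 > 1))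

theorem getLimitsLoop_char : ∀ (rest : List Int) (prev start : Int) (acc : List Int),
    getLimitsLoop rest prev start acc = acc ++ start :: hRun prev rest := by
  intro rest
  induction rest with
  | nil => intro prev start acc; simp [getLimitsLoop, hRun]
  | cons l t ih =>
      intro prev start acc
      simp only [getLimitsLoop, hRun]
      by_cases h : l - prev > 1
      · simp [h, ih]
      · simp [h, ih]

theorem altLoop_char (v : List Int) : ∀ (bs : List Int) (s : Int) (acc : List Int),
    altLoop v bs s acc = acc ++ PySem.List.pyGetD v s 0 :: kRun v bs := by
  intro bs
  induction bs with
  | nil => intro s acc; simp [altLoop, kRun]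
  | cons b t ih =>
      intro s acc
      simp only [altLoop, kRun]
      rw [ih]
      simp

theorem pyGetD_shift (x : Int) (t : List Int) (i : Int) (hi : 1 ≤ i) :
    PySem.List.pyGetD (x :: t) i 0 = PySem.List.pyGetD t (i - 1) 0 := by
  rw [PySem.List.pyGetD_of_nonneg _ _ (by omega), PySem.List.pyGetD_of_nonneg _ _ (by omega)]
  rw [show i.toNat = (i-1).toNat + 1 by omega, List.getD_cons_succ]

theorem pyRange_two_shift (n : Int) (hn : 2 ≤ n) :
    PySem.List.pyRange 2 n 1 = (PySem.List.pyRange 1 (n-1) 1).map (· + 1) := by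
  rw [PySem.List.pyRange_one, PySem.List.pyRange_one]
  rw [show (n - 1 - 1).toNat = (n - 2).toNat by omega, List.map_map]
  exact List.map_congr_left (fun k _ => by simp [Function.comp]; ring)

theorem kRun_shift (x : Int) (t : List Int) (ht : t ≠ []) :
    ∀ (bs : List Int), (∀ b ∈ bs, 1 ≤ b) →
    kRun (x :: t) (bs.map (· + 1)) = kRun t bs := by
  intro bs
  induction bs with
  | nil =>
      intro _
      simp only [List.map_nil, kRun]
      have hlt : 1 ≤ (t.length : Int) := by
        exact_mod_cast List.length_pos_iff.mpr ht
      have h1 : 1 ≤ ((x :: t).length : Int) - 1 := by rw [List.length_cons]; push_cast; omega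
      rw [pyGetD_shift x t _ h1,
        show ((x :: t).length : Int) - 1 - 1 = (t.length : Int) - 1 by rw [List.length_cons]; push_cast; ring]
  | cons b bs ih =>
      intro hb
      have hb1 : 1 ≤ b := hb b (by simp)
      simp only [List.map_cons, kRun]
      rw [pyGetD_shift x t (b + 1 - 1) (by omega), pyGetD_shift x t (b + 1) (by omega)]
      rw [ih (fun c hc => hb c (by simp [hc]))]
      norm_num

theorem breaksOf_mem_ge_one (v : List Int) : ∀ b ∈ breaksOf v, 1 ≤ b := by
  intro b hb
  unfold breaksOf at hb
  have := List.mem_filter.mp hb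
  exact (PySem.List.mem_pyRange_one.mp this.1).1

theorem breaksOf_cons_cons (x y : Int) (t : List Int) :
    breaksOf (x :: y :: t) =
      (if y - x > 1 then [1] else []) ++ (breaksOf (y :: t)).map (· + 1) := by
  unfold breaksOf
  have hn : ((x :: y :: t).length : Int) = (t.length : Int) + 2 := by simp; ring
  rw [hn]
  rw [PySem.List.pyRange_one_cons (by omega)]
  rw [List.filter_cons]
  rw [show (1:Int)+1 = 2 by norm_num, pyRange_two_shift _ (by omega)]
  rw [List.filter_map]
  have hcong : ((PySem.List.pyRange 1 ((t.length:Int) + 2 - 1) 1).filter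
      ((fun i => decide (PySem.List.pyGetD (x :: y :: t) i 0 - PySem.List.pyGetD (x :: y :: t) (i - 1) 0 > 1)) ∘ (· + 1)))
      = ((PySem.List.pyRange 1 (((y :: t).length : Int)) 1).filter
      (fun i => decide (PySem.List.pyGetD (y :: t) i 0 - PySem.List.pyGetD (y :: t) (i - 1) 0 > 1))) := by
    rw [show (t.length:Int) + 2 - 1 = (((y :: t).length : Int)) by simp; ring]
    apply List.filter_congr
    intro i hi
    have h1 : 1 ≤ i := (PySem.List.mem_pyRange_one.mp hi).1
    simp only [Function.comp]
    rw [show i + 1 - 1 = i by ring]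
    rw [pyGetD_shift x (y::t) (i+1) (by omega), pyGetD_shift x (y::t) i h1]
    rw [show i + 1 - 1 = i by ring]
  rw [hcong]
  have hhead : (decide (PySem.List.pyGetD (x :: y :: t) 1 0 - PySem.List.pyGetD (x :: y :: t) (1 - 1) 0 > 1)) = decide (y - x > 1) := by
    rw [pyGetD_shift x (y::t) 1 (by norm_num), show (1:Int) - 1 = 0 by ring]
    simp [PySem.List.pyGetD_zero_cons]
  rw [hhead]
  by_cases h : y - x > 1 <;> simp [h]

theorem kRun_breaks (t : List Int) : ∀ (x : Int), kRun (x :: t) (breaksOf (x :: t)) = hRun x t := by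
  induction t with
  | nil =>
      intro x
      unfold breaksOf
      simp [PySem.List.pyRange_one_eq_nil (by norm_num : (1:Int) ≤ 1), kRun, hRun]
  | cons y t ih =>
      intro x
      rw [breaksOf_cons_cons]
      have hmem := breaksOf_mem_ge_one (y :: t)
      have hne : (y :: t) ≠ [] := by simp
      by_cases h : y - x > 1
      · simp only [h, if_pos, List.cons_append, List.nil_append, kRun]
        rw [pyGetD_shift x (y :: t) 1 (by norm_num), kRun_shift x (y :: t) hne _ hmem, ih y]
        norm_num [hRun, h, PySem.List.pyGetD_zero_cons]
      · simp only [h, if_false, List.nil_append]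
        rw [kRun_shift x (y :: t) hne _ hmem, ih y]
        simp [hRun, h]

-- ===== VERDICT (by name: the statement is the Claim_ definition above) =====
theorem get_limits_spec : Claim_equal_get_limits := by
  intro vector _ hpre
  unfold Spec_get_limits
  match vector, hpre with
  | x :: t, _ =>
    show get_limits (x :: t) = get_limits_alt (x :: t)
    unfold get_limits get_limits_alt
    rw [PySem.List.slice_from_one]
    simp only [List.tail_cons, PySem.List.pyGetD_zero_cons]
    rw [getLimitsLoop_char, altLoop_char]
    simp only [List.nil_append, PySem.List.pyGetD_zero_cons]
    exact congrArg (x :: ·) (kRun_breaks t x).symm
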